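-- pv_equiv track=rewrite | github.com/davidsluo/notes | CSCI_4760/pj03/file_transfer/utils.py | divide_into_even_sections
-- ===== SOURCE A (Python) =====
-- import itertools
--
-- def divide_into_even_sections(size, divisions):
--     if divisions == 0:
--         raise ZeroDivisionError
--     elif divisions < 0:
--         raise ValueError('Number of divisions cannot be less than zero.')
--
--     section_size, remainder = divmod(size, divisions)
--     sections = [section_size] * (divisions - remainder)
--     sections.extend([section_size + 1] * remainder)
--
--     indicies = [0] + list(itertools.accumulate(sections))
--     start_end = ((start, end) for start, end in zip(indicies[:-1], indicies[1:]))
--     offset_length = [(start, end - start) for start, end in start_end]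
--     return offset_length
-- ===== SOURCE B (Python) =====
-- def divide_into_even_sections(size, divisions):
--     if divisions == 0:
--         raise ZeroDivisionError
--     elif divisions < 0:
--         raise ValueError('Number of divisions cannot be less than zero.')
--
--     section_size, remainder = divmod(size, divisions)
--     result = []
--     offset = 0
--     for i in range(divisions):
--         length = section_size + (1 if i >= divisions - remainder else 0)
--         result.append((offset, length))
--         offset += length
--     return result
-- ===== Notes on version B (the rewrite author's own statement) =====
-- stated objective: simpler
-- what changed: Replaces the sections-list + itertools.accumulate prefix sums + zip-of-shifted-index-lists pipeline with one direct loop that computes each section's length from its index and keeps a running offset.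
import Mathlib
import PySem

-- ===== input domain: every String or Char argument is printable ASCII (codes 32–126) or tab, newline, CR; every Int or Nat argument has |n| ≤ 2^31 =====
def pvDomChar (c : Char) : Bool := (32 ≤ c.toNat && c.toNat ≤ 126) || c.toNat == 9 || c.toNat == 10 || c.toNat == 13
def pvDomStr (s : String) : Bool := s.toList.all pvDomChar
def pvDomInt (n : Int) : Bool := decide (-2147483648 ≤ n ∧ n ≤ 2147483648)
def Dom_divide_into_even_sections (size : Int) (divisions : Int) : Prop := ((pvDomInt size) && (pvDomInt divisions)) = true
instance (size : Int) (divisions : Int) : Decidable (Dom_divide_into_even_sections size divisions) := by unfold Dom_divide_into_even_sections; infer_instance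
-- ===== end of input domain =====

-- B replaces A's sections-list + accumulate + zip pipeline with one loop keeping a
-- running offset and computing each length from its index (objective: simpler).

-- ===== PORT A =====
-- itertools.accumulate: running sums (same length as the input list)
def pvAccum : Int → List Int → List Int
  | _, [] => []
  | off, x :: xs => (off + x) :: pvAccum (off + x) xs

def divide_into_even_sections (size : Int) (divisions : Int) : List (Int × Int) :=
  let section_size := PySem.Int.floordiv size divisions
  let remainder := PySem.Int.mod size divisions
  let sections := List.replicate (divisions - remainder).toNat section_size
                    ++ List.replicate remainder.toNat (section_size + 1)
  let indicies := 0 :: pvAccum 0 sections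
  let start_end := indicies.dropLast.zip indicies.tail
  start_end.map (fun p => (p.1, p.2 - p.1))

-- ===== PORT B =====
def divide_into_even_sections_alt (size : Int) (divisions : Int) : List (Int × Int) :=
  let section_size := PySem.Int.floordiv size divisions
  let remainder := PySem.Int.mod size divisions
  ((PySem.List.pyRange 0 divisions 1).foldl
    (fun (st : Int × List (Int × Int)) i =>
      let length := section_size + (if divisions - remainder ≤ i then 1 else 0)
      (st.1 + length, st.2 ++ [(st.1, length)]))
    (0, [])).2

-- ===== PRECONDITION & SPEC =====
-- A raises ZeroDivisionError for divisions = 0 and ValueError for divisions < 0.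
def Pre_divide_into_even_sections (size : Int) (divisions : Int) : Prop := 0 < divisions
instance (size : Int) (divisions : Int) : Decidable (Pre_divide_into_even_sections size divisions) := by unfold Pre_divide_into_even_sections; infer_instance

def pvWitness_divide_into_even_sections : Int × Int := (10, 3)

def Spec_divide_into_even_sections (size : Int) (divisions : Int) (out : List (Int × Int)) : Prop := out = divide_into_even_sections_alt size divisions
instance (size : Int) (divisions : Int) (out : List (Int × Int)) : Decidable (Spec_divide_into_even_sections size divisions out) := by unfold Spec_divide_into_even_sections; infer_instance

-- ===== CLAIM (what is proved, stated in full; the proofs are below) =====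
def Claim_equal_divide_into_even_sections : Prop := ∀ (size : Int) (divisions : Int), Dom_divide_into_even_sections size divisions → Pre_divide_into_even_sections size divisions → Spec_divide_into_even_sections size divisions (divide_into_even_sections size divisions)

-- ===== LEMMAS AND PROOFS =====

-- common normal form: sections list -> (offset, length) pairs
def pvBuild (off : Int) : List Int → List (Int × Int)
  | [] => []
  | x :: xs => (off, x) :: pvBuild (off + x) xs

-- A's pipeline on any sections list is pvBuild
theorem pvA_pipeline (L : List Int) (off : Int) :
    ((off :: pvAccum off L).dropLast.zip (off :: pvAccum off L).tail).map
      (fun p => (p.1, p.2 - p.1)) = pvBuild off L := by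
  induction L generalizing off with
  | nil => simp [pvAccum, pvBuild]
  | cons x xs ih =>
    have h := ih (off + x)
    simp [pvAccum, pvBuild] at h ⊢
    cases hxs : pvAccum (off + x) xs with
    | nil => simp [hxs] at h ⊢; omega
    | cons y ys =>
      simp [hxs] at h ⊢
      exact h

-- B's fold on any index list is pvBuild of the mapped lengths
theorem pvB_fold (f : Int → Int) (l : List Int) (off : Int) (acc : List (Int × Int)) :
    (l.foldl (fun (st : Int × List (Int × Int)) i =>
        (st.1 + f i, st.2 ++ [(st.1, f i)])) (off, acc)).2
      = acc ++ pvBuild off (l.map f) := by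
  induction l generalizing off acc with
  | nil => simp [pvBuild]
  | cons x xs ih => simp [pvBuild, ih]

theorem pvMap_const {f : Int → Int} {c : Int} (l : List Int) (h : ∀ x ∈ l, f x = c) :
    l.map f = List.replicate l.length c := by
  induction l with
  | nil => simp
  | cons x xs ih =>
    simp only [List.map, List.length_cons, List.replicate_succ]
    rw [h x (by simp), ih (fun y hy => h y (by simp [hy]))]

-- the mapped range of lengths IS A's sections list
theorem pvRange_map_sections (s r d : Int) (hr0 : 0 ≤ r) (hrd : r < d) :
    (PySem.List.pyRange 0 d 1).map (fun i => s + (if d - r ≤ i then 1 else 0))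
      = List.replicate (d - r).toNat s ++ List.replicate r.toNat (s + 1) := by
  rw [PySem.List.pyRange_one_append 0 (d - r) d (by omega) (by omega), List.map_append]
  rw [pvMap_const (c := s) _ (fun x hx => by
        rw [PySem.List.mem_pyRange_one] at hx
        simp only [if_neg (by omega : ¬ d - r ≤ x), add_zero])]
  rw [pvMap_const (c := s + 1) _ (fun x hx => by
        rw [PySem.List.mem_pyRange_one] at hx
        simp only [if_pos (by omega : d - r ≤ x)])]
  rw [PySem.List.length_pyRange_one, PySem.List.length_pyRange_one]
  congr 2 <;> omega

-- ===== VERDICT (by name: the statement is the Claim_ definition above) =====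
theorem divide_into_even_sections_spec : Claim_equal_divide_into_even_sections := by
  intro size divisions _ hpre
  unfold Spec_divide_into_even_sections divide_into_even_sections divide_into_even_sections_alt
  have hd : (0 : Int) < divisions := hpre
  have hr0 := PySem.Int.mod_nonneg size hd
  have hrd := PySem.Int.mod_lt size hd
  simp only []
  rw [pvB_fold, pvRange_map_sections _ _ _ hr0 hrd, List.nil_append, pvA_pipeline]
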